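-- pv_equiv track=rewrite | github.com/jeevamani007/data-analysis | BACK-END/retail_analyzer.py | _identify_cases_for_user
-- ===== SOURCE A (Python) =====
-- from typing import Dict, List, Any, Optional, Tuple
--
-- def _identify_cases_for_user(events: List[Dict[str, Any]]) -> List[List[Dict[str, Any]]]:
--     """
--     For one user: events are already time-sorted.
--
--     Rules:
--     - Every time we see "Order Created", we start a NEW process run (case),
--       except the very first one which attaches any earlier events (registration,
--       login, browse, cart) as the start of Case_1.
--     - If user never creates an order, all events form a single case.
--     """
--     if not events:
--         return []
--
--     cases: List[List[Dict[str, Any]]] = []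
--     pending_pre_order: List[Dict[str, Any]] = []
--     current: List[Dict[str, Any]] = []
--     has_order_in_current = False
--
--     order_start_events = {"Order Created", "Order Placed"}
--     for ev in events:
--         name = ev.get("event", "")
--         events_in_current = {e.get("event", "") for e in current}
--         if name in events_in_current:
--             # Same activity meaning again → new Case ID (one clean process flow per case).
--             if current:
--                 cases.append(current)
--                 current = []
--                 has_order_in_current = False
--             current.append(ev)
--             has_order_in_current = name in order_start_events
--             continue
--         if name in order_start_events:
--             # Close existing case (if it already has an order)
--             if current and has_order_in_current:
--                 cases.append(current)
--                 current = []
--                 has_order_in_current = False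
--
--             # First order for this user: attach any pre-order context
--             if not current and pending_pre_order:
--                 current = pending_pre_order.copy()
--                 pending_pre_order = []
--
--             current.append(ev)
--             has_order_in_current = True
--         else:
--             if current:
--                 current.append(ev)
--             else:
--                 # Before first order – keep as context
--                 pending_pre_order.append(ev)
--
--     if current:
--         cases.append(current)
--     elif pending_pre_order:
--         # No orders at all: still create one case for this customer's activity
--         cases.append(pending_pre_order)
--
--     return cases
-- ===== SOURCE B (Python) =====
-- from typing import Dict, List, Any
--
-- ORDER_STARTS = {"Order Created", "Order Placed"}
--
--
-- def _peel_case(seed, evs):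
--     """evs is non-empty and its first event always joins the case (a case holds
--     at least one event).  Extend the case until a repeated event name or a
--     second order event would start the next one; return (case, remaining)."""
--     case = list(seed) + [evs[0]]
--     names = {e.get("event", "") for e in case}
--     has_order = evs[0].get("event", "") in ORDER_STARTS
--     i = 1
--     while i < len(evs):
--         name = evs[i].get("event", "")
--         if name in names or (name in ORDER_STARTS and has_order):
--             break
--         case.append(evs[i])
--         names.add(name)
--         has_order = has_order or name in ORDER_STARTS
--         i += 1
--     return case, evs[i:]
--
--
-- def _identify_cases_for_user(events: List[Dict[str, Any]]) -> List[List[Dict[str, Any]]]: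
--     """Staged decomposition: first locate the first order event (everything
--     before it is pre-order context), then repeatedly peel one complete case
--     off the front of the remaining events."""
--     if not events:
--         return []
--     k = next((i for i, e in enumerate(events)
--               if e.get("event", "") in ORDER_STARTS), None)
--     if k is None:
--         return [list(events)]
--     cases = []
--     seed, rest = events[:k], events[k:]
--     while rest:
--         case, rest = _peel_case(seed, rest)
--         cases.append(case)
--         seed = []
--     return cases
-- ===== Notes on version B (the rewrite author's own statement) =====
-- stated objective: alternative
-- what changed: B replaces A's single-pass four-state machine (pending/current/has_order updated per event, with the current case's name set rebuilt by a comprehension on every event) by a staged decomposition: first find the index of the first order event (everything before it is the pre-order context), then repeatedly peel one complete case off the front of the remaining events with a helper that extends a case until a repeated name or a second order event.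
import Mathlib
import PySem

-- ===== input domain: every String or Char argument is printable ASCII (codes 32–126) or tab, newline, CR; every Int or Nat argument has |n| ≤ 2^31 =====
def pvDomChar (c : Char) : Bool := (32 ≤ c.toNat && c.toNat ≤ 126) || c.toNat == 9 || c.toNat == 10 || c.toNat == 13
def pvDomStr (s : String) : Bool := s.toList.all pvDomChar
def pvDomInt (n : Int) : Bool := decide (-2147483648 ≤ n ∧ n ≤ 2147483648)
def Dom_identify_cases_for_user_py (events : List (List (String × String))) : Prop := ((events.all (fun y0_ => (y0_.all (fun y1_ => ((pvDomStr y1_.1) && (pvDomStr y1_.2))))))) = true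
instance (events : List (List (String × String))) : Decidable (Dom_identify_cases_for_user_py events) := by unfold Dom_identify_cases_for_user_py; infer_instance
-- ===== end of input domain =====

-- B is a staged decomposition (find the first order event, then peel one complete case at a
-- time) instead of A's single state-machine pass; objective: alternative.

-- ev.get("event", "")
def pvGetEvent (ev : List (String × String)) : String := PySem.Dict.getD (PySem.Dict.mk ev) "event" ""

-- name in {"Order Created", "Order Placed"}
def pvIsOrder (name : String) : Bool := name == "Order Created" || name == "Order Placed"

-- ===== PORT A =====
-- the for-loop of A: state (cases, pending_pre_order, current, has_order_in_current)
def pvGoA (cases : List (List (List (String × String)))) (pending current : List (List (String × String)))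
    (hasOrder : Bool) (events : List (List (String × String))) : List (List (List (String × String))) :=
  match events with
  | [] =>
      if !current.isEmpty then cases ++ [current]
      else if !pending.isEmpty then cases ++ [pending]
      else cases
  | ev :: rest =>
      let name := pvGetEvent ev
      let eventsInCurrent : PySem.Set String := PySem.Set.ofList (current.map pvGetEvent)
      if eventsInCurrent.contains name then
        -- same activity again → new case
        let (cases, current, hasOrder) :=
          if !current.isEmpty then (cases ++ [current], ([] : List (List (String × String))), false)
          else (cases, current, hasOrder)
        let _ := hasOrder
        pvGoA cases pending (current ++ [ev]) (pvIsOrder name) rest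
      else if pvIsOrder name then
        let (cases, current, hasOrder) :=
          if !current.isEmpty && hasOrder then (cases ++ [current], ([] : List (List (String × String))), false)
          else (cases, current, hasOrder)
        let (current, pending) :=
          if current.isEmpty && !pending.isEmpty then (pending, ([] : List (List (String × String))))
          else (current, pending)
        let _ := hasOrder
        pvGoA cases pending (current ++ [ev]) true rest
      else if !current.isEmpty then
        pvGoA cases pending (current ++ [ev]) hasOrder rest
      else
        pvGoA cases (pending ++ [ev]) current hasOrder rest

def identify_cases_for_user_py (events : List (List (String × String))) : List (List (List (String × String))) :=
  if events.isEmpty then [] else pvGoA [] [] [] false events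

-- ===== PORT B =====
-- the set of event names occurring in a case under construction
def pvNames (l : List (List (String × String))) : PySem.Set String :=
  PySem.Set.ofList (l.map pvGetEvent)

-- _peel_case's while-loop: extend `case` until a repeated name or a second order event
def pvPeelGo (case : List (List (String × String))) (names : PySem.Set String) (hasOrder : Bool)
    (evs : List (List (String × String))) :
    List (List (String × String)) × List (List (String × String)) :=
  match evs with
  | [] => (case, [])
  | ev :: rest =>
      let name := pvGetEvent ev
      if names.contains name || (pvIsOrder name && hasOrder) then (case, ev :: rest)
      else pvPeelGo (case ++ [ev]) (names.add name) (hasOrder || pvIsOrder name) rest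

-- the remainder returned by pvPeelGo is a suffix of its input (used for termination below)
lemma pvPeelGo_rest_le (evs : List (List (String × String))) :
    ∀ case names hasOrder, (pvPeelGo case names hasOrder evs).2.length ≤ evs.length := by
  induction evs with
  | nil => intro _ _ _; simp [pvPeelGo]
  | cons ev rest ih =>
      intro case names hasOrder
      rw [pvPeelGo]
      split
      · simp
      · exact le_trans (ih _ _ _) (Nat.le_succ _)

-- _peel_case(seed, ev::rest): the first event always joins the case
def pvPeel (seed : List (List (String × String))) (ev : List (String × String))
    (rest : List (List (String × String))) :
    List (List (String × String)) × List (List (String × String)) :=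
  pvPeelGo (seed ++ [ev]) (pvNames (seed ++ [ev])) (pvIsOrder (pvGetEvent ev)) rest

-- the while-loop of B: peel one case off the front while events remain
def pvPeelAll (seed : List (List (String × String))) (evs : List (List (String × String))) :
    List (List (List (String × String))) :=
  match evs with
  | [] => []
  | ev :: rest =>
      let p := pvPeel seed ev rest
      p.1 :: pvPeelAll [] p.2
  termination_by evs.length
  decreasing_by exact Nat.lt_succ_of_le (pvPeelGo_rest_le _ _ _ _)

def identify_cases_for_user_py_alt (events : List (List (String × String))) :
    List (List (List (String × String))) :=
  if events.isEmpty then []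
  else
    match events.findIdx? (fun e => pvIsOrder (pvGetEvent e)) with
    | none => [events]
    | some k => pvPeelAll (events.take k) (events.drop k)

-- ===== PRECONDITION & SPEC =====
def Spec_identify_cases_for_user_py (events : List (List (String × String))) (out : List (List (List (String × String)))) : Prop := out = identify_cases_for_user_py_alt events
instance (events : List (List (String × String))) (out : List (List (List (String × String)))) : Decidable (Spec_identify_cases_for_user_py events out) := by unfold Spec_identify_cases_for_user_py; infer_instance

-- ===== CLAIM (what is proved, stated in full; the proofs are below) =====
def Claim_equal_identify_cases_for_user_py : Prop := ∀ (events : List (List (String × String))), Dom_identify_cases_for_user_py events → Spec_identify_cases_for_user_py events (identify_cases_for_user_py events)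

-- ===== LEMMAS AND PROOFS =====

-- names(current ++ [ev]) = names(current).add(name)
lemma pvNames_snoc (l : List (List (String × String))) (ev : List (String × String)) :
    pvNames (l ++ [ev]) = PySem.Set.add (pvNames l) (pvGetEvent ev) := by
  simp [pvNames, PySem.Set.ofList_eq_foldl]

-- an empty case contains no names
lemma pvNames_nil_contains (s : String) :
    (PySem.Set.ofList (([] : List (List (String × String))).map pvGetEvent)).contains s = false := by
  simp [PySem.Set.ofList, PySem.Set.contains]

-- case phase (pending already empty, current nonempty): A's state machine peels exactly
-- the cases B peels
lemma pvGoA_case (evs : List (List (String × String))) :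
    ∀ cases current hasOrder, current ≠ [] →
      pvGoA cases [] current hasOrder evs =
        cases ++ ((pvPeelGo current (pvNames current) hasOrder evs).1 ::
          pvPeelAll [] (pvPeelGo current (pvNames current) hasOrder evs).2) := by
  induction evs with
  | nil =>
      intro cases current hasOrder hne
      have hie : current.isEmpty = false := by simp [hne]
      simp [pvGoA, pvPeelGo, pvPeelAll, hie]
  | cons ev rest ih =>
      intro cases current hasOrder hne
      have hie : current.isEmpty = false := by simp [hne]
      rw [pvGoA, pvPeelGo]
      by_cases hc : (PySem.Set.ofList (current.map pvGetEvent)).contains (pvGetEvent ev) = true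
      · -- duplicate name: break the case here, the next case starts at ev
        have hcn : (pvNames current).contains (pvGetEvent ev) = true := hc
        simp only [hc, hcn, Bool.true_or, if_true, hie, Bool.not_false]
        rw [pvPeelAll, ih (cases ++ [current]) ([] ++ [ev]) (pvIsOrder (pvGetEvent ev)) (by simp)]
        simp [pvPeel, List.append_assoc]
      · have hcF : (PySem.Set.ofList (current.map pvGetEvent)).contains (pvGetEvent ev) = false := by
          simpa using hc
        have hcnF : (pvNames current).contains (pvGetEvent ev) = false := hcF
        by_cases ho : pvIsOrder (pvGetEvent ev) = true
        · cases hho : hasOrder with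
          | true =>
              -- second order event: break the case here
              simp only [hcF, hcnF, ho, hie, Bool.false_or, Bool.true_and, Bool.and_true,
                Bool.not_false, Bool.true_and, if_true, Bool.false_eq_true, if_false,
                List.isEmpty_nil, Bool.not_true, Bool.and_false, List.nil_append]
              rw [pvPeelAll, ih (cases ++ [current]) [ev] true (by simp)]
              simp [pvPeel, ho, List.append_assoc]
          | false =>
              -- first order event of the case: keep extending
              simp only [hcF, hcnF, ho, hie, Bool.false_or, Bool.and_false, Bool.false_eq_true,
                if_false, Bool.not_false, Bool.true_and, if_true, List.isEmpty_nil,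
                Bool.false_and, Bool.or_true]
              rw [ih cases (current ++ [ev]) true (by simp), pvNames_snoc]
        · -- ordinary event: keep extending
          have hoF : pvIsOrder (pvGetEvent ev) = false := by simpa using ho
          simp only [hcF, hcnF, hoF, hie, Bool.false_or, Bool.false_and, Bool.false_eq_true,
            if_false, Bool.not_false, if_true, Bool.or_false]
          rw [ih cases (current ++ [ev]) hasOrder (by simp), pvNames_snoc]

-- pending phase: before the first order event everything accumulates as context,
-- matching B's findIdx?/take/drop split
lemma pvGoA_pending (evs : List (List (String × String))) :
    ∀ pending,
      pvGoA [] pending [] false evs =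
        match evs.findIdx? (fun e => pvIsOrder (pvGetEvent e)) with
        | none => if pending ++ evs = [] then [] else [pending ++ evs]
        | some k => pvPeelAll (pending ++ evs.take k) (evs.drop k) := by
  induction evs with
  | nil =>
      intro pending
      cases hpe : pending.isEmpty with
      | true => simp_all [pvGoA, List.isEmpty_iff]
      | false =>
          have : pending ≠ [] := by simpa [List.isEmpty_iff] using hpe
          simp [pvGoA, hpe, this]
  | cons ev rest ih =>
      intro pending
      rw [List.findIdx?_cons]
      by_cases ho : pvIsOrder (pvGetEvent ev) = true
      · -- first order event: merge pending into the case and enter the case phase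
        have lhs_eq : pvGoA [] pending [] false (ev :: rest) = pvGoA [] [] (pending ++ [ev]) true rest := by
          rw [pvGoA]
          cases hpe : pending.isEmpty with
          | true =>
              have h0 : pending = [] := by simpa [List.isEmpty_iff] using hpe
              subst h0
              simp [ho, pvNames_nil_contains]
          | false =>
              simp [ho, hpe, pvNames_nil_contains]
        rw [lhs_eq, pvGoA_case rest [] (pending ++ [ev]) true (by simp)]
        simp only [ho, if_true, List.take_zero, List.drop_zero, List.append_nil]
        rw [pvPeelAll]
        simp [pvPeel, ho]
      · -- still context: push onto pending
        have hoF : pvIsOrder (pvGetEvent ev) = false := by simpa using ho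
        have lhs_eq : pvGoA [] pending [] false (ev :: rest) = pvGoA [] (pending ++ [ev]) [] false rest := by
          rw [pvGoA]
          simp [hoF, pvNames_nil_contains]
        rw [lhs_eq, ih (pending ++ [ev])]
        simp only [hoF, Bool.false_eq_true, if_false]
        cases hf : rest.findIdx? (fun e => pvIsOrder (pvGetEvent e)) with
        | none => simp
        | some k => simp [List.take_succ_cons, List.drop_succ_cons, List.append_assoc]

-- ===== VERDICT (by name: the statement is the Claim_ definition above) =====
theorem identify_cases_for_user_py_spec : Claim_equal_identify_cases_for_user_py := by
  intro events _
  unfold Spec_identify_cases_for_user_py identify_cases_for_user_py identify_cases_for_user_py_alt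
  cases he : events.isEmpty with
  | true => simp
  | false =>
      have hne : events ≠ [] := by simpa [List.isEmpty_iff] using he
      simp only [Bool.false_eq_true, if_false]
      rw [pvGoA_pending events []]
      cases hf : events.findIdx? (fun e => pvIsOrder (pvGetEvent e)) with
      | none => simp [hne]
      | some k => simp
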